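-- pv_equiv track=rewrite | github.com/Adhikram/Study_Resources | DSA/Python/Questions/Graph/find_path_if_exists.py | valid_path_union_find
-- ===== SOURCE A (Python) =====
-- from typing import List
--
-- def valid_path_union_find(
--     n: int, edges: List[List[int]], source: int, destination: int
-- ) -> bool:
--     parent = list(range(n))
--
--     def find(x: int) -> int:
--         if parent[x] != x:
--             parent[x] = find(parent[x])
--         return parent[x]
--
--     def union(x: int, y: int):
--         rootX = find(x)
--         rootY = find(y)
--         if rootX != rootY:
--             parent[rootY] = rootX
--
--     for u, v in edges:
--         union(u, v)
--
--     return find(source) == find(destination)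
-- ===== SOURCE B (Python) =====
-- def valid_path_union_find(n, edges, source, destination):
--     comp = list(range(n))
--     for u, v in edges:
--         ru, rv = comp[u], comp[v]
--         if ru != rv:
--             comp = [ru if c == rv else c for c in comp]
--     return comp[source] == comp[destination]
-- ===== Notes on version B (the rewrite author's own statement) =====
-- stated objective: alternative
-- what changed: Replaces the union-find parent forest (recursive find with path compression) by a flat component-label array that is relabelled wholesale on each merging edge, with a single final label comparison.
import Mathlib
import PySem

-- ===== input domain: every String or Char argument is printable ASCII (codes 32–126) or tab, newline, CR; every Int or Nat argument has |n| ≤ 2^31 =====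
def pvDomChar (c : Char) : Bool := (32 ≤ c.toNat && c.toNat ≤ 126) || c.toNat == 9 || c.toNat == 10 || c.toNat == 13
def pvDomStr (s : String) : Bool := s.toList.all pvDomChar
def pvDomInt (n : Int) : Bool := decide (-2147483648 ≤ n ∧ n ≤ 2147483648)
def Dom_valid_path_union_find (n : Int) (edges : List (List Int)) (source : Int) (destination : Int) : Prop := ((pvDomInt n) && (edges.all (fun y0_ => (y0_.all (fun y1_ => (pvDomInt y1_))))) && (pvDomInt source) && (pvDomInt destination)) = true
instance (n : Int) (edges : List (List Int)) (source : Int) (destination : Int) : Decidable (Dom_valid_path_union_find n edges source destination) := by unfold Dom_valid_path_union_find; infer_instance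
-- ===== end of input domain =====

-- B replaces the union-find parent forest (recursive find with path compression) by a flat
-- component-label list relabelled wholesale at each merging edge; equal labels = same component.
-- A mutates only its local `parent` list, so return-value equivalence is full equivalence.

-- ===== PORT A =====
-- literal port of the nested `find` (path compression); the fuel argument is only a
-- totality guard, proven sufficient under Pre_ (Python's recursion always terminates there)
def pvFindA (fuel : Nat) (parent : List Int) (x : Int) : Option (List Int × Int) :=
  match fuel with
  | 0 => none
  | fuel + 1 =>
    match PySem.List.pyGet? parent x with
    | none => none                           -- IndexError
    | some px =>
      if px ≠ x then
        match pvFindA fuel parent px with    -- parent[x] = find(parent[x])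
        | none => none
        | some (p1, r) =>
          match PySem.List.pySet? p1 x r with
          | none => none
          | some p2 =>
            match PySem.List.pyGet? p2 x with  -- return parent[x]
            | none => none
            | some v => some (p2, v)
      else some (parent, px)                 -- return parent[x]

-- literal port of `union`
def pvUnionA (fuel : Nat) (parent : List Int) (x y : Int) : Option (List Int) :=
  match pvFindA fuel parent x with
  | none => none
  | some (p1, rootX) =>
    match pvFindA fuel p1 y with
    | none => none
    | some (p2, rootY) =>
      if rootX ≠ rootY then PySem.List.pySet? p2 rootY rootX else some p2

-- loop body of `for u, v in edges: union(u, v)` (none = a raised exception)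
def pvLoopA (fuel : Nat) (acc : Option (List Int)) (e : List Int) : Option (List Int) :=
  match acc with
  | none => none
  | some p =>
    match e with
    | [u, v] => pvUnionA fuel p u v
    | _ => none                              -- ValueError on unpacking

def valid_path_union_find (n : Int) (edges : List (List Int)) (source : Int) (destination : Int) : Bool :=
  let fuel := edges.length + 2               -- recursion bound only (see pvFindA)
  -- parent = list(range(n)), then the edge loop
  match edges.foldl (pvLoopA fuel) (some (PySem.List.pyRange 0 n 1)) with
  | none => false
  | some p =>
    match pvFindA fuel p source with
    | none => false
    | some (p1, rs) =>
      match pvFindA fuel p1 destination with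
      | none => false
      | some (_, rd) => rs == rd             -- find(source) == find(destination)

-- ===== PORT B =====
-- loop body of B: read both labels, relabel the whole list when they differ
def pvLoopB (acc : Option (List Int)) (e : List Int) : Option (List Int) :=
  match acc with
  | none => none
  | some comp =>
    match e with
    | [u, v] =>
      match PySem.List.pyGet? comp u with
      | none => none
      | some ru =>
        match PySem.List.pyGet? comp v with
        | none => none
        | some rv =>
          if ru ≠ rv then some (comp.map (fun c => if c = rv then ru else c))
          else some comp
    | _ => none
  
def valid_path_union_find_alt (n : Int) (edges : List (List Int)) (source : Int) (destination : Int) : Bool :=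
  -- comp = list(range(n)), then the edge loop
  match edges.foldl pvLoopB (some (PySem.List.pyRange 0 n 1)) with
  | none => false
  | some comp =>
    match PySem.List.pyGet? comp source with
    | none => false
    | some cs =>
      match PySem.List.pyGet? comp destination with
      | none => false
      | some cd => cs == cd                  -- comp[source] == comp[destination]

-- ===== PRECONDITION & SPEC =====
-- Pre_ is exactly the inputs where Python A returns normally: every edge is a pair of
-- in-range (possibly negative, Python-style) node indices, and so are source/destination
-- (otherwise A raises ValueError on unpacking or IndexError on the list accesses).
def Pre_valid_path_union_find (n : Int) (edges : List (List Int)) (source : Int) (destination : Int) : Prop :=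
  (∀ e ∈ edges, e.length = 2 ∧ ∀ z ∈ e, -n ≤ z ∧ z < n) ∧
  (-n ≤ source ∧ source < n) ∧ (-n ≤ destination ∧ destination < n)
instance (n : Int) (edges : List (List Int)) (source : Int) (destination : Int) : Decidable (Pre_valid_path_union_find n edges source destination) := by unfold Pre_valid_path_union_find; infer_instance

def pvWitness_valid_path_union_find : Int × List (List Int) × Int × Int := (3, [[0, 1], [-1, 1]], 0, 2)

def Spec_valid_path_union_find (n : Int) (edges : List (List Int)) (source : Int) (destination : Int) (out : Bool) : Prop := out = valid_path_union_find_alt n edges source destination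
instance (n : Int) (edges : List (List Int)) (source : Int) (destination : Int) (out : Bool) : Decidable (Spec_valid_path_union_find n edges source destination out) := by unfold Spec_valid_path_union_find; infer_instance

-- ===== CLAIM (what is proved, stated in full; the proofs are below) =====
def Claim_equal_valid_path_union_find : Prop := ∀ (n : Int) (edges : List (List Int)) (source : Int) (destination : Int), Dom_valid_path_union_find n edges source destination → Pre_valid_path_union_find n edges source destination → Spec_valid_path_union_find n edges source destination (valid_path_union_find n edges source destination)

-- ===== LEMMAS AND PROOFS =====

-- Python index normalisation
def pvNorm (len : Nat) (i : Int) : Nat := if 0 ≤ i then i.toNat else len - (-i).toNat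

lemma pvNorm_lt {len : Nat} {i : Int} (h : PySem.Raise.InRange len i) : pvNorm len i < len := by
  unfold PySem.Raise.InRange at h; unfold pvNorm; split <;> omega

lemma pyIdx_norm {len : Nat} {i : Int} (h : PySem.Raise.InRange len i) :
    PySem.List.pyIdx? len i = some (pvNorm len i) := by
  unfold PySem.Raise.InRange at h
  simp only [PySem.List.pyIdx?, pvNorm]
  by_cases h0 : 0 ≤ i
  · rw [if_pos h0, if_pos h0, if_pos (by omega)]
  · rw [if_neg h0, if_neg h0, if_pos (by omega)]

lemma pyGet_norm {p : List Int} {i : Int} (h : PySem.Raise.InRange p.length i) :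
    PySem.List.pyGet? p i = p[pvNorm p.length i]? := by
  simp [PySem.List.pyGet?, pyIdx_norm h]

lemma pySet_norm {p : List Int} {i : Int} (v : Int) (h : PySem.Raise.InRange p.length i) :
    PySem.List.pySet? p i v = some (p.set (pvNorm p.length i) v) := by
  simp [PySem.List.pySet?, pyIdx_norm h]

-- all parent entries are valid indices
def pvGood (p : List Int) : Prop := ∀ e ∈ p, 0 ≤ e ∧ e < (p.length : Int)

-- the root of x in parent forest p, with fuel
def pvRootF : Nat → List Int → Nat → Option Nat
  | 0, _, _ => none
  | f + 1, p, x =>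
    match p[x]? with
    | none => none
    | some y => if y = (x : Int) then some x else pvRootF f p y.toNat

lemma rootF_succ (f : Nat) (p : List Int) (x : Nat) :
    pvRootF (f + 1) p x =
      match p[x]? with
      | none => none
      | some y => if y = (x : Int) then some x else pvRootF f p y.toNat := rfl

lemma rootF_mono {f g : Nat} {p : List Int} {x r : Nat} (h : pvRootF f p x = some r) (hfg : f ≤ g) :
    pvRootF g p x = some r := by
  induction f generalizing x g with
  | zero => simp [pvRootF] at h
  | succ f ih =>
    obtain ⟨g', rfl⟩ : ∃ g', g = g' + 1 := ⟨g - 1, by omega⟩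
    rw [rootF_succ] at h
    rw [rootF_succ]
    cases hy : p[x]? with
    | none => simp [hy] at h
    | some w =>
      simp only [hy] at h ⊢
      by_cases hw : w = (x : Int)
      · rw [if_pos hw] at h ⊢; exact h
      · rw [if_neg hw] at h ⊢; exact ih h (by omega)

lemma rootF_fix {f : Nat} {p : List Int} {x r : Nat} (h : pvRootF f p x = some r) :
    r < p.length ∧ p[r]? = some (r : Int) := by
  induction f generalizing x with
  | zero => simp [pvRootF] at h
  | succ f ih =>
    rw [rootF_succ] at h
    cases hy : p[x]? with
    | none => simp [hy] at h
    | some y =>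
      simp only [hy] at h
      by_cases hw : y = (x : Int)
      · rw [if_pos hw] at h
        obtain rfl := Option.some.inj h
        exact ⟨(List.getElem?_eq_some_iff.mp hy).1, by rw [hy, hw]⟩
      · rw [if_neg hw] at h
        exact ih h

lemma rootF_pos_fuel {f : Nat} {p : List Int} {x r : Nat} (h : pvRootF f p x = some r) : 1 ≤ f := by
  cases f with
  | zero => simp [pvRootF] at h
  | succ f => omega

lemma rootF_unique {f g : Nat} {p : List Int} {x r s : Nat}
    (h1 : pvRootF f p x = some r) (h2 : pvRootF g p x = some s) : r = s := by
  have e1 := rootF_mono h1 (Nat.le_max_left f g)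
  have e2 := rootF_mono h2 (Nat.le_max_right f g)
  rw [e1] at e2; simpa using e2

lemma rootF_self {p : List Int} {r : Nat} (h : p[r]? = some (r : Int)) :
    pvRootF 1 p r = some r := by rw [rootF_succ]; simp [h]

lemma set_root_pres {p : List Int} {a r g : Nat}
    (hroot : pvRootF g p a = some r) :
    ∀ f y s, pvRootF f p y = some s → pvRootF f (p.set a (r : Int)) y = some s := by
  intro f
  induction f with
  | zero => intro y s h; simp [pvRootF] at h
  | succ f ih =>
    intro y s h
    rw [rootF_succ] at h
    rw [rootF_succ]
    cases hy : p[y]? with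
    | none => simp [hy] at h
    | some w =>
      have hylen : y < p.length := (List.getElem?_eq_some_iff.mp hy).1
      simp only [hy] at h
      by_cases hya : y = a
      · subst hya
        by_cases hw : w = (y : Int)
        · -- y is its own root: the set is a no-op on roots (r = y)
          rw [if_pos hw] at h
          have hr : r = y := rootF_unique hroot (rootF_self (by rw [hy, hw]))
          subst hr
          have hget : (p.set r (r : Int))[r]? = some (r : Int) :=
            List.getElem?_set_self hylen
          simp only [hget, if_pos rfl]
          exact h
        · -- p[y] ≠ y : s is the root of y, so s = r, and r is a fixed point ≠ y
          rw [if_neg hw] at h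
          have hs : pvRootF (f + 1) p y = some s := by
            rw [rootF_succ]; simp only [hy]; rw [if_neg hw]; exact h
          have hsr : s = r := rootF_unique hs hroot
          subst hsr
          have hfix := rootF_fix hroot
          have hry : s ≠ y := by
            intro he; subst he
            rw [hy] at hfix
            exact hw (Option.some.inj hfix.2)
          have hget : (p.set y (s : Int))[y]? = some (s : Int) :=
            List.getElem?_set_self hylen
          simp only [hget]
          rw [if_neg (by exact_mod_cast hry)]
          have hf1 : 1 ≤ f := rootF_pos_fuel h
          obtain ⟨f0, rfl⟩ : ∃ f0, f = f0 + 1 := ⟨f - 1, by omega⟩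
          rw [Int.toNat_natCast, rootF_succ]
          have hgs : (p.set y (s : Int))[s]? = some (s : Int) := by
            rw [List.getElem?_set_ne (by omega)]; exact hfix.2
          simp [hgs]
      · -- y untouched
        have hget : (p.set a (r : Int))[y]? = some w := by
          rw [List.getElem?_set_ne (by omega)]; exact hy
        simp only [hget]
        by_cases hw : w = (y : Int)
        · rw [if_pos hw] at h ⊢; exact h
        · rw [if_neg hw] at h ⊢; exact ih _ _ h

-- linking root b under root a re-roots exactly b's class to a (one extra chain step)
lemma link_pres {p : List Int} {a b : Nat}
    (ha : p[a]? = some (a : Int)) (hb : p[b]? = some (b : Int)) (hab : a ≠ b) :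
    ∀ f y s, pvRootF f p y = some s →
      pvRootF (f + 1) (p.set b (a : Int)) y = some (if s = b then a else s) := by
  intro f
  induction f with
  | zero => intro y s h; simp [pvRootF] at h
  | succ f ih =>
    intro y s h
    rw [rootF_succ] at h
    cases hy : p[y]? with
    | none => simp [hy] at h
    | some w =>
      have hylen : y < p.length := (List.getElem?_eq_some_iff.mp hy).1
      simp only [hy] at h
      by_cases hw : w = (y : Int)
      · rw [if_pos hw] at h
        obtain rfl : s = y := (Option.some.inj h).symm
        by_cases hsb : s = b
        · subst hsb
          rw [if_pos rfl, rootF_succ]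
          have hget : (p.set s (a : Int))[s]? = some (a : Int) :=
            List.getElem?_set_self hylen
          simp only [hget]
          rw [if_neg (by exact_mod_cast hab)]
          rw [Int.toNat_natCast, rootF_succ]
          have hga : (p.set s (a : Int))[a]? = some (a : Int) := by
            rw [List.getElem?_set_ne (by omega)]; exact ha
          simp [hga]
        · rw [if_neg hsb, rootF_succ]
          have hget : (p.set b (a : Int))[s]? = some (s : Int) := by
            rw [List.getElem?_set_ne (by omega)]; exact hy.trans (by rw [hw])
          simp [hget]
      · rw [if_neg hw] at h
        have hyb : y ≠ b := by
          intro he; subst he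
          rw [hy] at hb
          exact hw (Option.some.inj hb)
        rw [rootF_succ]
        have hget : (p.set b (a : Int))[y]? = some w := by
          rw [List.getElem?_set_ne (by omega)]; exact hy
        simp only [hget]
        rw [if_neg hw]
        exact ih _ _ h

lemma good_set {p : List Int} {i : Nat} {v : Int} (hG : pvGood p) (h0 : 0 ≤ v)
    (hv : v < (p.length : Int)) : pvGood (p.set i v) := by
  intro e he
  rcases List.mem_or_eq_of_mem_set he with h | rfl
  · simpa [List.length_set] using hG e h
  · simpa [List.length_set] using ⟨h0, hv⟩

lemma findA_succ (fuel : Nat) (p : List Int) (x : Int) :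
    pvFindA (fuel + 1) p x =
      match PySem.List.pyGet? p x with
      | none => none
      | some px =>
        if px ≠ x then
          match pvFindA fuel p px with
          | none => none
          | some (p1, r) =>
            match PySem.List.pySet? p1 x r with
            | none => none
            | some p2 =>
              match PySem.List.pyGet? p2 x with
              | none => none
              | some v => some (p2, v)
        else some (p, px) := rfl

-- what one successful find returns and does to the state
def pvFindOut (p : List Int) (fuel : Nat) (x : Int) (r : Nat) : Prop :=
  ∃ p', pvFindA fuel p x = some (p', (r : Int)) ∧ p'.length = p.length ∧ pvGood p' ∧
    ∀ g y s, pvRootF g p y = some s → pvRootF g p' y = some s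

lemma findA_nonneg {f : Nat} : ∀ {p : List Int} {x r fuel : Nat}, pvGood p →
    pvRootF f p x = some r → f ≤ fuel → pvFindOut p fuel (x : Int) r := by
  induction f with
  | zero => intro p x r fuel _ h _; simp [pvRootF] at h
  | succ f ih =>
    intro p x r fuel hG h hfuel
    obtain ⟨fl, rfl⟩ : ∃ fl, fuel = fl + 1 := ⟨fuel - 1, by omega⟩
    rw [rootF_succ] at h
    cases hget : p[x]? with
    | none => simp [hget] at h
    | some w =>
      simp only [hget] at h
      have hxlen : x < p.length := (List.getElem?_eq_some_iff.mp hget).1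
      unfold pvFindOut
      rw [findA_succ]
      simp only [PySem.List.pyGet?_natCast, hget]
      by_cases hw : w = (x : Int)
      · rw [if_pos hw] at h
        obtain rfl := Option.some.inj h
        rw [if_neg (by simp [hw])]
        exact ⟨p, by rw [hw], rfl, hG, fun _ _ _ hs => hs⟩
      · rw [if_neg hw] at h
        have hmem := hG w (List.mem_of_getElem? hget)
        have hcast : ((w.toNat : Nat) : Int) = w := Int.toNat_of_nonneg hmem.1
        obtain ⟨p1, hcall, hlen1, hG1, hpres1⟩ := ih hG h (show f ≤ fl by omega)
        rw [hcast] at hcall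
        have hxlen1 : x < p1.length := hlen1 ▸ hxlen
        have hgetr : (p1.set x (r : Int))[x]? = some (r : Int) :=
          List.getElem?_set_self hxlen1
        rw [if_pos hw]
        simp only [hcall, PySem.List.pySet?_natCast p1 x ((r:Nat):Int) hxlen1, PySem.List.pyGet?_natCast, hgetr]
        have hroot0 : pvRootF (f + 1) p x = some r := by
          rw [rootF_succ]; simp only [hget]; rw [if_neg hw]; exact h
        have hroot1 : pvRootF (f + 1) p1 x = some r := hpres1 _ _ _ hroot0
        have hrlen := rootF_fix h
        refine ⟨p1.set x (r : Int), rfl, by simp [hlen1], ?_, ?_⟩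
        · exact good_set hG1 (by positivity) (by rw [hlen1]; exact_mod_cast hrlen.1)
        · intro g y s hs
          exact set_root_pres hroot1 g y s (hpres1 g y s hs)

lemma findA_spec {f : Nat} {p : List Int} {x : Int} {r fuel : Nat} (hG : pvGood p)
    (hx : PySem.Raise.InRange p.length x)
    (hroot : pvRootF f p (pvNorm p.length x) = some r) (hfuel : f + 1 ≤ fuel) :
    pvFindOut p fuel x r := by
  by_cases hx0 : 0 ≤ x
  · -- nonnegative index: x is literally a Nat and the nonneg lemma applies
    have hcast : ((x.toNat : Nat) : Int) = x := Int.toNat_of_nonneg hx0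
    have hn : pvNorm p.length x = x.toNat := by simp [pvNorm, hx0]
    rw [hn] at hroot
    have := findA_nonneg hG hroot (show f ≤ fuel by omega)
    rwa [hcast] at this
  · -- negative index: one manual unfolding, then the nonneg lemma on parent[x] ≥ 0
    obtain ⟨fl, rfl⟩ : ∃ fl, fuel = fl + 1 := ⟨fuel - 1, by omega⟩
    have hf1 : 1 ≤ f := rootF_pos_fuel hroot
    obtain ⟨f0, rfl⟩ : ∃ f0, f = f0 + 1 := ⟨f - 1, by omega⟩
    have hnx := pvNorm_lt hx
    have hroot0 := hroot
    rw [rootF_succ] at hroot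
    cases hget : p[pvNorm p.length x]? with
    | none => simp [hget] at hroot
    | some w =>
      simp only [hget] at hroot
      have hmem := hG w (List.mem_of_getElem? hget)
      have hwx : w ≠ x := by intro he; exact hx0 (he ▸ hmem.1)
      have hcast : ((w.toNat : Nat) : Int) = w := Int.toNat_of_nonneg hmem.1
      have hrootw : ∃ f', f' ≤ f0 + 1 ∧ pvRootF f' p w.toNat = some r := by
        by_cases hw : w = ((pvNorm p.length x : Nat) : Int)
        · rw [if_pos hw] at hroot
          obtain rfl := Option.some.inj hroot
          exact ⟨1, by omega, by rw [hw, Int.toNat_natCast]; exact rootF_self (by rw [hget, hw])⟩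
        · rw [if_neg hw] at hroot
          exact ⟨f0, by omega, hroot⟩
      obtain ⟨f', hf', hrootw⟩ := hrootw
      obtain ⟨p1, hcall, hlen1, hG1, hpres1⟩ := findA_nonneg hG hrootw (show f' ≤ fl by omega)
      rw [hcast] at hcall
      have hx1 : PySem.Raise.InRange p1.length x := hlen1 ▸ hx
      have hnorm1 : pvNorm p1.length x = pvNorm p.length x := by rw [hlen1]
      have hlen2 : (p1.set (pvNorm p1.length x) (r : Int)).length = p.length := by
        rw [List.length_set, hlen1]
      have hx2 : PySem.Raise.InRange (p1.set (pvNorm p1.length x) (r : Int)).length x :=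
        hlen2 ▸ hx
      have hnorm2 : pvNorm (p1.set (pvNorm p1.length x) (r : Int)).length x
          = pvNorm p.length x := by rw [hlen2]
      have hget2 : (p1.set (pvNorm p1.length x) (r : Int))[pvNorm (p1.set (pvNorm p1.length x) (r : Int)).length x]? = some (r : Int) := by
        rw [hnorm2, ← hnorm1]
        exact List.getElem?_set_self (by rw [hnorm1, hlen1]; exact hnx)
      unfold pvFindOut
      rw [findA_succ, pyGet_norm hx]
      simp only [hget]
      rw [if_pos hwx]
      simp only [hcall, pySet_norm _ hx1, pyGet_norm hx2, hget2]
      have hroot1 : pvRootF (f0 + 1) p1 (pvNorm p1.length x) = some r := by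
        rw [hnorm1]; exact hpres1 _ _ _ hroot0
      refine ⟨p1.set (pvNorm p1.length x) (r : Int), rfl, hlen2, ?_, ?_⟩
      · refine good_set hG1 (by positivity) ?_
        have := (rootF_fix hrootw).1
        rw [hlen1]; exact_mod_cast this
      · intro g y s hs
        exact set_root_pres hroot1 g y s (hpres1 g y s hs)

lemma sameRoot_iff {p : List Int} {x y rx ry : Nat} {f g : Nat}
    (hx : pvRootF f p x = some rx) (hy : pvRootF g p y = some ry) :
    (∃ r f' g', pvRootF f' p x = some r ∧ pvRootF g' p y = some r) ↔ rx = ry := by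
  constructor
  · rintro ⟨r, f', g', h1, h2⟩
    rw [rootF_unique hx h1, rootF_unique hy h2]
  · rintro rfl
    exact ⟨rx, f, g, hx, hy⟩

lemma unionA_spec {p : List Int} {u v : Int} {a b fa fb fuel : Nat} (hG : pvGood p)
    (hu : PySem.Raise.InRange p.length u) (hv : PySem.Raise.InRange p.length v)
    (hra : pvRootF fa p (pvNorm p.length u) = some a)
    (hrb : pvRootF fb p (pvNorm p.length v) = some b)
    (hfa : fa + 1 ≤ fuel) (hfb : fb + 1 ≤ fuel) :
    ∃ p', pvUnionA fuel p u v = some p' ∧ p'.length = p.length ∧ pvGood p' ∧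
      ∀ g y s, pvRootF g p y = some s →
        pvRootF (g + 1) p' y = some (if a ≠ b ∧ s = b then a else s) := by
  obtain ⟨p1, hc1, hlen1, hG1, hpres1⟩ := findA_spec hG hu hra hfa
  have hv1 : PySem.Raise.InRange p1.length v := hlen1 ▸ hv
  have hrb1 : pvRootF fb p1 (pvNorm p1.length v) = some b := by
    rw [hlen1]; exact hpres1 _ _ _ hrb
  obtain ⟨p2, hc2, hlen2, hG2, hpres2⟩ := findA_spec hG1 hv1 hrb1 hfb
  have hlen21 : p2.length = p.length := hlen2.trans hlen1
  have hra2 : pvRootF fa p2 (pvNorm p.length u) = some a :=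
    hpres2 _ _ _ (hpres1 _ _ _ hra)
  have hrb2 : pvRootF fb p2 (pvNorm p.length v) = some b :=
    hpres2 _ _ _ (hpres1 _ _ _ hrb)
  have hfixa := rootF_fix hra2
  have hfixb := rootF_fix hrb2
  unfold pvUnionA
  simp only [hc1, hc2]
  by_cases hab : a = b
  · subst hab
    rw [if_neg (by simp)]
    refine ⟨p2, rfl, hlen21, hG2, ?_⟩
    intro g y s hs
    rw [if_neg (by simp)]
    exact rootF_mono (hpres2 _ _ _ (hpres1 _ _ _ hs)) (by omega)
  · rw [if_pos (by exact_mod_cast hab)]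
    have hblen : b < p2.length := hfixb.1
    rw [PySem.List.pySet?_natCast p2 b ((a : Nat) : Int) hblen]
    refine ⟨p2.set b (a : Int), rfl, by simp [hlen21], ?_, ?_⟩
    · exact good_set hG2 (by positivity) (by exact_mod_cast hfixa.1)
    · intro g y s hs
      have := link_pres hfixa.2 hfixb.2 hab g y s (hpres2 _ _ _ (hpres1 _ _ _ hs))
      simpa [hab] using this

-- the coupling invariant after k merges: parents well-formed, chains short, and
-- equal union-find roots exactly when equal B-labels
def pvInv (k : Nat) (p comp : List Int) : Prop :=
  comp.length = p.length ∧ pvGood p ∧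
  (∀ x, x < p.length → ∃ f r, f ≤ k ∧ pvRootF (f + 1) p x = some r) ∧
  (∀ x y, x < p.length → y < p.length →
    ((∃ r f g, pvRootF f p x = some r ∧ pvRootF g p y = some r) ↔ comp[x]? = comp[y]?))

lemma loop_step {k fuel : Nat} {p comp : List Int} {u v : Int}
    (hInv : pvInv k p comp)
    (hu : PySem.Raise.InRange p.length u) (hv : PySem.Raise.InRange p.length v)
    (hfuel : k + 2 ≤ fuel) :
    ∃ p' comp', pvLoopA fuel (some p) [u, v] = some p' ∧
      pvLoopB (some comp) [u, v] = some comp' ∧ pvInv (k + 1) p' comp' ∧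
      p'.length = p.length := by
  obtain ⟨hclen, hG, htot, hiff⟩ := hInv
  have hnu := pvNorm_lt hu
  have hnv := pvNorm_lt hv
  obtain ⟨fu, a, hfu, hra⟩ := htot _ hnu
  obtain ⟨fv, b, hfv, hrb⟩ := htot _ hnv
  -- B's labels at u and v
  have hcu : comp[pvNorm p.length u]? = some (comp[pvNorm p.length u]'(by omega)) :=
    List.getElem?_eq_getElem (by omega)
  have hcv : comp[pvNorm p.length v]? = some (comp[pvNorm p.length v]'(by omega)) :=
    List.getElem?_eq_getElem (by omega)
  set cu := comp[pvNorm p.length u]'(by omega) with hcud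
  set cv := comp[pvNorm p.length v]'(by omega) with hcvd
  -- labels agree exactly when roots agree
  have hkey : cu = cv ↔ a = b := by
    rw [← Option.some_inj, ← hcu, ← hcv, ← hiff _ _ hnu hnv, sameRoot_iff hra hrb]
  obtain ⟨p', hcA, hlen', hG', hpres'⟩ :=
    unionA_spec (fa := fu + 1) (fb := fv + 1) (fuel := fuel) hG hu hv hra hrb (by omega) (by omega)
  -- root transform for arbitrary nodes
  have hroot' : ∀ x, x < p.length → ∃ f r, f ≤ k ∧ pvRootF (f + 1) p x = some r ∧
      pvRootF (f + 2) p' x = some (if a ≠ b ∧ r = b then a else r) := by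
    intro x hx
    obtain ⟨f, r, hf, hr⟩ := htot x hx
    exact ⟨f, r, hf, hr, hpres' _ _ _ hr⟩
  -- label facts
  have hlabu : ∀ x rx f, x < p.length → pvRootF f p x = some rx →
      (rx = a ↔ comp[x]? = some cu) := by
    intro x rx f hx hr
    rw [← sameRoot_iff hr hra, hiff x _ hx hnu, hcu]
  have hlabv : ∀ x rx f, x < p.length → pvRootF f p x = some rx →
      (rx = b ↔ comp[x]? = some cv) := by
    intro x rx f hx hr
    rw [← sameRoot_iff hr hrb, hiff x _ hx hnv, hcv]
  have hgetu : PySem.List.pyGet? comp u = some cu := by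
    rw [pyGet_norm (by rw [hclen]; exact hu)]
    rw [show pvNorm comp.length u = pvNorm p.length u by rw [hclen]]
    exact hcu
  have hgetv : PySem.List.pyGet? comp v = some cv := by
    rw [pyGet_norm (by rw [hclen]; exact hv)]
    rw [show pvNorm comp.length v = pvNorm p.length v by rw [hclen]]
    exact hcv
  by_cases hab : a = b
  · -- no merge on either side
    have hcucv : cu = cv := hkey.mpr hab
    refine ⟨p', comp, by simp [pvLoopA, hcA], ?_, ?_, hlen'⟩
    · simp [pvLoopB, hgetu, hgetv, hcucv]
    · refine ⟨hclen.trans hlen'.symm, hG', ?_, ?_⟩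
      · intro x hx
        obtain ⟨f, r, hf, _, hr'⟩ := hroot' x (hlen' ▸ hx)
        exact ⟨f + 1, _, by omega, hr'⟩
      · intro x y hx hy
        obtain ⟨f, rx, _, hrx, hrx'⟩ := hroot' x (hlen' ▸ hx)
        obtain ⟨g, ry, _, hry, hry'⟩ := hroot' y (hlen' ▸ hy)
        rw [sameRoot_iff hrx' hry', ← hiff x y (hlen' ▸ hx) (hlen' ▸ hy),
          sameRoot_iff hrx hry]
        simp [hab]
  · -- merge: A links root b under a, B relabels cv to cu
    have hcucv : cu ≠ cv := fun h => hab (hkey.mp h)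
    refine ⟨p', comp.map (fun c => if c = cv then cu else c),
      by simp [pvLoopA, hcA], ?_, ?_, hlen'⟩
    · simp [pvLoopB, hgetu, hgetv, hcucv]
    · refine ⟨by simp [hclen, hlen'], hG', ?_, ?_⟩
      · intro x hx
        obtain ⟨f, r, hf, _, hr'⟩ := hroot' x (hlen' ▸ hx)
        exact ⟨f + 1, _, by omega, hr'⟩
      · intro x y hx hy
        obtain ⟨f, rx, _, hrx, hrx'⟩ := hroot' x (hlen' ▸ hx)
        obtain ⟨g, ry, _, hry, hry'⟩ := hroot' y (hlen' ▸ hy)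
        rw [sameRoot_iff hrx' hry']
        have hx0 : x < p.length := hlen' ▸ hx
        have hy0 : y < p.length := hlen' ▸ hy
        have hcx : comp[x]? = some (comp[x]'(by omega)) := List.getElem?_eq_getElem (by omega)
        have hcy : comp[y]? = some (comp[y]'(by omega)) := List.getElem?_eq_getElem (by omega)
        set cx := comp[x]'(by omega)
        set cy := comp[y]'(by omega)
        have hxa := (hlabu x rx _ hx0 hrx).trans (by rw [hcx, Option.some_inj])
        have hxb := (hlabv x rx _ hx0 hrx).trans (by rw [hcx, Option.some_inj])
        have hya := (hlabu y ry _ hy0 hry).trans (by rw [hcy, Option.some_inj])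
        have hyb := (hlabv y ry _ hy0 hry).trans (by rw [hcy, Option.some_inj])
        have hxy : rx = ry ↔ cx = cy := by
          rw [← sameRoot_iff hrx hry, hiff x y hx0 hy0, hcx, hcy, Option.some_inj]
        rw [List.getElem?_map, List.getElem?_map, hcx, hcy]
        simp only [Option.map_some, Option.some_inj]
        by_cases hrxb : rx = b <;> by_cases hryb : ry = b
        · rw [if_pos ⟨hab, hrxb⟩, if_pos ⟨hab, hryb⟩,
              if_pos (hxb.mp hrxb), if_pos (hyb.mp hryb)]
          simp
        · rw [if_pos ⟨hab, hrxb⟩, if_neg (fun h => hryb h.2),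
              if_pos (hxb.mp hrxb), if_neg (fun h => hryb (hyb.mpr h))]
          constructor
          · intro h; exact (hya.mp h.symm).symm
          · intro h; exact (hya.mpr h.symm).symm
        · rw [if_neg (fun h => hrxb h.2), if_pos ⟨hab, hryb⟩,
              if_neg (fun h => hrxb (hxb.mpr h)), if_pos (hyb.mp hryb)]
          exact hxa
        · rw [if_neg (fun h => hrxb h.2), if_neg (fun h => hryb h.2),
              if_neg (fun h => hrxb (hxb.mpr h)), if_neg (fun h => hryb (hyb.mpr h))]
          exact hxy

lemma fold_inv {fuel : Nat} : ∀ (es : List (List Int)) {p comp : List Int} {k : Nat},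
    pvInv k p comp →
    (∀ e ∈ es, e.length = 2 ∧ ∀ z ∈ e, PySem.Raise.InRange p.length z) →
    k + es.length + 2 ≤ fuel →
    ∃ p' comp', es.foldl (pvLoopA fuel) (some p) = some p' ∧
      es.foldl pvLoopB (some comp) = some comp' ∧ pvInv (k + es.length) p' comp' ∧
      p'.length = p.length := by
  intro es
  induction es with
  | nil =>
    intro p comp k hInv _ _
    exact ⟨p, comp, rfl, rfl, by simpa using hInv, rfl⟩
  | cons e es ih =>
    intro p comp k hInv hok hfuel
    obtain ⟨he2, hez⟩ := hok e (by simp)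
    obtain ⟨u, v, rfl⟩ : ∃ u v, e = [u, v] := by
      match e, he2 with
      | [u, v], _ => exact ⟨u, v, rfl⟩
    have hu := hez u (by simp)
    have hv := hez v (by simp)
    have hfuel' : k + es.length + 3 ≤ fuel := by
      simp only [List.length_cons] at hfuel; omega
    obtain ⟨p1, comp1, hA, hB, hInv1, hlen1⟩ := loop_step (fuel := fuel) hInv hu hv (by omega)
    obtain ⟨p', comp', hA', hB', hInv', hlen'⟩ := ih hInv1
      (fun e' he' => ⟨(hok e' (by simp [he'])).1,
        fun z hz => hlen1 ▸ (hok e' (by simp [he'])).2 z hz⟩)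
      (by omega)
    refine ⟨p', comp', ?_, ?_, ?_, hlen'.trans hlen1⟩
    · rw [List.foldl_cons, hA]; exact hA'
    · rw [List.foldl_cons, hB]; exact hB'
    · rw [show k + ([u, v] :: es).length = (k + 1) + es.length by
        simp only [List.length_cons]; omega]
      exact hInv'

lemma inv_init (n : Int) : pvInv 0 (PySem.List.pyRange 0 n 1) (PySem.List.pyRange 0 n 1) := by
  have hget : ∀ x, x < (PySem.List.pyRange 0 n 1).length →
      (PySem.List.pyRange 0 n 1)[x]? = some (x : Int) := by
    intro x hx
    rw [PySem.List.length_pyRange_one] at hx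
    rw [PySem.List.pyRange_one]
    simp only [List.getElem?_map, List.getElem?_range (by omega : x < (n - 0).toNat)]
    simp
  refine ⟨rfl, ?_, ?_, ?_⟩
  · intro e he
    rw [PySem.List.mem_pyRange_one] at he
    refine ⟨he.1, ?_⟩
    rw [PySem.List.length_pyRange_one]
    omega
  · intro x hx
    exact ⟨0, x, le_refl 0, rootF_self (hget x hx)⟩
  · intro x y hx hy
    rw [sameRoot_iff (rootF_self (hget x hx)) (rootF_self (hget y hy)), hget x hx, hget y hy]
    simp

-- ===== VERDICT (by name: the statement is the Claim_ definition above) =====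
theorem valid_path_union_find_spec : Claim_equal_valid_path_union_find := by
  intro n edges source destination _ hPre
  obtain ⟨hedges, hsrc, hdst⟩ := hPre
  unfold Spec_valid_path_union_find valid_path_union_find valid_path_union_find_alt
  have hn : 0 < n := by omega
  have hlen0 : (PySem.List.pyRange 0 n 1).length = n.toNat := by
    rw [PySem.List.length_pyRange_one]; omega
  have hcast : ((PySem.List.pyRange 0 n 1).length : Int) = n := by rw [hlen0]; omega
  have hInR : ∀ z : Int, -n ≤ z → z < n →
      PySem.Raise.InRange (PySem.List.pyRange 0 n 1).length z := by
    intro z h1 h2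
    exact ⟨by rw [hcast]; omega, by rw [hcast]; omega⟩
  obtain ⟨p', comp', hA, hB, hInv, hlenp⟩ :=
    fold_inv (fuel := edges.length + 2) edges (inv_init n)
      (fun e he => ⟨(hedges e he).1,
        fun z hz => hInR z ((hedges e he).2 z hz).1 ((hedges e he).2 z hz).2⟩)
      (by omega)
  obtain ⟨hclen, hG, htot, hiff⟩ := hInv
  have hsi : PySem.Raise.InRange p'.length source := by
    rw [hlenp]; exact hInR source hsrc.1 hsrc.2
  have hdi : PySem.Raise.InRange p'.length destination := by
    rw [hlenp]; exact hInR destination hdst.1 hdst.2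
  obtain ⟨fs, rs, hfs, hrs⟩ := htot _ (pvNorm_lt hsi)
  obtain ⟨fd, rd, hfd, hrd⟩ := htot _ (pvNorm_lt hdi)
  obtain ⟨p1, hc1, hlen1, hG1, hpres1⟩ :=
    findA_spec (fuel := edges.length + 2) hG hsi hrs (by omega)
  have hdi1 : PySem.Raise.InRange p1.length destination := hlen1 ▸ hdi
  have hrd1 : pvRootF (fd + 1) p1 (pvNorm p1.length destination) = some rd := by
    rw [hlen1]; exact hpres1 _ _ _ hrd
  obtain ⟨p2, hc2, _, _, _⟩ :=
    findA_spec (fuel := edges.length + 2) hG1 hdi1 hrd1 (by omega)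
  -- B-side final reads
  have hnlen : comp'.length = p'.length := hclen
  have hcs : comp'[pvNorm p'.length source]? = some (comp'[pvNorm p'.length source]'(by
      rw [hnlen]; exact pvNorm_lt hsi)) := List.getElem?_eq_getElem _
  have hcd : comp'[pvNorm p'.length destination]? = some (comp'[pvNorm p'.length destination]'(by
      rw [hnlen]; exact pvNorm_lt hdi)) := List.getElem?_eq_getElem _
  have hgs : PySem.List.pyGet? comp' source = comp'[pvNorm p'.length source]? := by
    rw [pyGet_norm (by rw [hnlen]; exact hsi),
      show pvNorm comp'.length source = pvNorm p'.length source by rw [hnlen]]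
  have hgd : PySem.List.pyGet? comp' destination = comp'[pvNorm p'.length destination]? := by
    rw [pyGet_norm (by rw [hnlen]; exact hdi),
      show pvNorm comp'.length destination = pvNorm p'.length destination by rw [hnlen]]
  -- equal roots iff equal labels
  have hfinal := hiff _ _ (pvNorm_lt hsi) (pvNorm_lt hdi)
  rw [sameRoot_iff hrs hrd] at hfinal
  simp only [hA, hB, hc1, hc2, hgs, hgd, hcs, hcd]
  rw [Bool.eq_iff_iff]
  simp only [beq_iff_eq, Nat.cast_inj]
  rw [hfinal, hcs, hcd, Option.some_inj]
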